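-- pv_equiv track=rewrite | github.com/hwstar-1204/Solve_Algorithm | programmers/기능 개발.py | solution
-- ===== SOURCE A (Python) =====
-- import math
--
-- def solution(progresses, speeds):
--     answer = []
--     complete_day = []
--     n = len(progresses)
--
--     for i in range(n):
--         complete_day.append(math.ceil((100 - progresses[i]) / speeds[i]))
--
--     first = complete_day[0]
--     count = 0
--
--     for i in range(n):
--         if complete_day[i] <= first:
--             count += 1
--         else:
--             answer.append(count)
--             count = 1
--             first = complete_day[i]
--
--     answer.append(count)
--     return answer
-- ===== SOURCE B (Python) =====
-- def solution(progresses, speeds):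
--     # completion day by exact integer ceiling division: ceil((100-p)/s) == -((p-100)//s)
--     days = [-((p - 100) // s) for p, s in zip(progresses, speeds)]
--     # indices where a new deployment group starts (a day exceeding every earlier day)
--     starts = []
--     peak = None
--     for i, d in enumerate(days):
--         if peak is None or d > peak:
--             starts.append(i)
--             peak = d
--     # group sizes are the gaps between consecutive start indices
--     return [b - a for a, b in zip(starts, starts[1:] + [len(days)])]
-- ===== Notes on version B (the rewrite author's own statement) =====
-- stated objective: alternative
-- what changed: Instead of A's single pass that carries a running count and group-leader value and emits counts on each break, B computes the completion days by exact integer ceiling division, collects the group START indices (positions whose day exceeds every earlier day) and returns the gaps between consecutive start indices.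
import Mathlib
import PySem

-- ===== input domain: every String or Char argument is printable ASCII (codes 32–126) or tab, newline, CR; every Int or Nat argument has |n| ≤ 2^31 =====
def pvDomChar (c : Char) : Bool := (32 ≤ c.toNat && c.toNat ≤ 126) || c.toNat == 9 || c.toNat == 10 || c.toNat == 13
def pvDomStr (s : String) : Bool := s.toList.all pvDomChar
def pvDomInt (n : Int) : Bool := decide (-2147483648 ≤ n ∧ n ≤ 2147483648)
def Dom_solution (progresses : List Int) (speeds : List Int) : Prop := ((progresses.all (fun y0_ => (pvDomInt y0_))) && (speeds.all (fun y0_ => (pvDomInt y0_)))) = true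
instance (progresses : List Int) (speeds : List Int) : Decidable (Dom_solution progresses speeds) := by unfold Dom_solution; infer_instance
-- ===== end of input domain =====

-- B keeps A's algorithmic output but derives the group sizes from group-start indices; A's return value only (no mutation involved).

-- ===== PORT A =====
-- math.ceil((100 - p) / s): on Dom (|ints| ≤ 2^31) the float division is correctly
-- rounded with numerator < 2^53, so the float ceil equals the exact integer ceiling
-- -((-(100 - p)) // s); ported exactly as that, with PySem floor division.
def pyCeil100 (p s : Int) : Int := -(PySem.Int.floordiv (-(100 - p)) s)

-- loop body of A's second for-loop (state = (answer, count, first)), applied to complete_day[i]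
def stepA (st : List Int × Int × Int) (d : Int) : List Int × Int × Int :=
  if d ≤ st.2.2 then (st.1, st.2.1 + 1, st.2.2)
  else (st.1 ++ [st.2.1], 1, d)

def solution (progresses : List Int) (speeds : List Int) : List Int :=
  let n : Int := progresses.length
  let complete_day :=
    (PySem.List.pyRange 0 n 1).foldl
      (fun cd i => cd ++ [pyCeil100 (PySem.List.pyGetD progresses i 0) (PySem.List.pyGetD speeds i 0)]) []
  let first := PySem.List.pyGetD complete_day 0 0
  let st := (PySem.List.pyRange 0 n 1).foldl
      (fun st i => stepA st (PySem.List.pyGetD complete_day i 0)) ([], 0, first)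
  st.1 ++ [st.2.1]

-- ===== PORT B =====
-- loop body of B's enumerate loop (state = (starts, peak))
def stepB (st : List Int × Option Int) (id : Int × Int) : List Int × Option Int :=
  match st.2 with
  | none => (st.1 ++ [id.1], some id.2)
  | some pk => if pk < id.2 then (st.1 ++ [id.1], some id.2) else (st.1, some pk)

def solution_alt (progresses : List Int) (speeds : List Int) : List Int :=
  let days := (progresses.zip speeds).map (fun ps => -(PySem.Int.floordiv (ps.1 - 100) ps.2))
  let st := (PySem.List.enumerate days 0).foldl stepB ([], none)
  let starts := st.1
  (starts.zip (starts.drop 1 ++ [(days.length : Int)])).map (fun ab => ab.2 - ab.1)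

-- ===== PRECONDITION & SPEC =====
-- Pre_ is exactly where A returns: nonempty progresses (else complete_day[0] raises IndexError),
-- speeds at least as long (else speeds[i] raises IndexError), and no zero among the used speeds
-- (else ZeroDivisionError).
def Pre_solution (progresses : List Int) (speeds : List Int) : Prop :=
  progresses ≠ [] ∧ progresses.length ≤ speeds.length ∧
    ∀ s ∈ speeds.take progresses.length, s ≠ 0
instance (progresses : List Int) (speeds : List Int) : Decidable (Pre_solution progresses speeds) := by
  unfold Pre_solution; infer_instance

def pvWitness_solution : List Int × List Int := ([93, 30, 55], [1, 30, 5])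

def Spec_solution (progresses : List Int) (speeds : List Int) (out : List Int) : Prop := out = solution_alt progresses speeds
instance (progresses : List Int) (speeds : List Int) (out : List Int) : Decidable (Spec_solution progresses speeds out) := by unfold Spec_solution; infer_instance

-- ===== CLAIM (what is proved, stated in full; the proofs are below) =====
def Claim_equal_solution : Prop := ∀ (progresses : List Int) (speeds : List Int), Dom_solution progresses speeds → Pre_solution progresses speeds → Spec_solution progresses speeds (solution progresses speeds)

-- ===== LEMMAS AND PROOFS =====

-- A's loop, written as structural recursion: days to process, current count, current leader
def aloop : List Int → Int → Int → List Int
  | [], c, _ => [c]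
  | d :: t, c, f => if d ≤ f then aloop t (c + 1) f else c :: aloop t 1 d

-- B's start indices, written as structural recursion: days, next index, current peak
def startsRec : List Int → Int → Int → List Int
  | [], _, _ => []
  | d :: t, i, pk => if pk < d then i :: startsRec t (i + 1) d else startsRec t (i + 1) pk

-- final peak of B's loop
def fpeak : List Int → Int → Int
  | [], pk => pk
  | d :: t, pk => fpeak t (if pk < d then d else pk)

-- gaps between consecutive entries, closed with e
def diffs : List Int → Int → List Int
  | [], _ => []
  | [a], e => [e - a]
  | a :: b :: t, e => (b - a) :: diffs (b :: t) e

theorem foldl_append_map {α β : Type} (l : List α) (g : α → β) (acc : List β) :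
    l.foldl (fun cd i => cd ++ [g i]) acc = acc ++ l.map g := by
  induction l generalizing acc with
  | nil => simp
  | cons x t ih => simp [List.foldl_cons, ih]

theorem foldlA_eq_aloop (l : List Int) (ans : List Int) (c f : Int) :
    (l.foldl stepA (ans, c, f)).1 ++ [(l.foldl stepA (ans, c, f)).2.1] = ans ++ aloop l c f := by
  induction l generalizing ans c f with
  | nil => simp [aloop]
  | cons d t ih =>
      simp only [List.foldl_cons, stepA, aloop]
      by_cases h : d ≤ f
      · simp only [if_pos h]; exact ih ans (c + 1) f
      · simp only [if_neg h]; rw [ih (ans ++ [c]) 1 d]; simp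

theorem foldlB_eq_startsRec (t : List Int) (i : Int) (acc : List Int) (pk : Int) :
    (PySem.List.enumerate t i).foldl stepB (acc, some pk)
      = (acc ++ startsRec t i pk, some (fpeak t pk)) := by
  induction t generalizing i acc pk with
  | nil => simp [PySem.List.enumerate_nil, startsRec, fpeak]
  | cons d t ih =>
      rw [PySem.List.enumerate_cons]
      simp only [List.foldl_cons, stepB, startsRec, fpeak]
      by_cases h : pk < d
      · simp only [if_pos h]; rw [ih (i + 1) (acc ++ [i]) d]; simp
      · simp only [if_neg h]; exact ih (i + 1) acc pk

theorem zipmap_eq_diffs (starts : List Int) (e : Int) :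
    (starts.zip (starts.drop 1 ++ [e])).map (fun ab => ab.2 - ab.1) = diffs starts e := by
  induction starts with
  | nil => simp [diffs]
  | cons a t ih =>
      cases t with
      | nil => simp [diffs]
      | cons b t' =>
          simp only [List.drop_succ_cons, List.drop_zero, List.cons_append, List.zip_cons_cons,
            List.map_cons, diffs]
          exact congrArg _ ih

theorem diffs_startsRec (t : List Int) (i pk j : Int) :
    diffs (j :: startsRec t i pk) (i + t.length) = aloop t (i - j) pk := by
  induction t generalizing i pk j with
  | nil => simp [startsRec, diffs, aloop]
  | cons d t ih =>
      simp only [startsRec, aloop, List.length_cons]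
      by_cases h : pk < d
      · simp only [if_pos h, if_neg (not_le.mpr h), diffs]
        have he : i + ((t.length + 1 : Nat) : Int) = (i + 1) + t.length := by push_cast; ring
        rw [he]
        have := ih (i + 1) d i
        rw [show i + 1 - i = (1 : Int) by ring] at this
        rw [this, show i - j = i - j by rfl]
      · simp only [if_neg h, if_pos (not_lt.mp h)]
        have he : i + ((t.length + 1 : Nat) : Int) = (i + 1) + t.length := by push_cast; ring
        rw [he, ih (i + 1) pk j, show i + 1 - j = i - j + 1 by ring]

-- the completion-day list, shared shape of both ports
theorem days_eq (progresses speeds : List Int) (h : progresses.length ≤ speeds.length) :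
    (PySem.List.pyRange 0 (progresses.length : Int) 1).map
        (fun i => pyCeil100 (PySem.List.pyGetD progresses i 0) (PySem.List.pyGetD speeds i 0))
      = (progresses.zip speeds).map (fun ps => -(PySem.Int.floordiv (ps.1 - 100) ps.2)) := by
  apply List.ext_getElem
  · simp [PySem.List.length_pyRange_one, h]
  · intro k h1 h2
    have hk : k < progresses.length := by
      simpa [PySem.List.length_pyRange_one] using h1
    have hks : k < speeds.length := lt_of_lt_of_le hk h
    simp only [List.getElem_map, PySem.List.getElem_pyRange_one, List.getElem_zip]
    have hp : PySem.List.pyGetD progresses ((0 : Int) + k) 0 = progresses[k] := by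
      rw [zero_add, PySem.List.pyGetD_natCast, List.getD_eq_getElem _ _ hk]
    have hs : PySem.List.pyGetD speeds ((0 : Int) + k) 0 = speeds[k] := by
      rw [zero_add, PySem.List.pyGetD_natCast, List.getD_eq_getElem _ _ hks]
    rw [hp, hs]
    simp [pyCeil100]

-- ===== VERDICT (by name: the statement is the Claim_ definition above) =====
theorem solution_spec : Claim_equal_solution := by
  intro progresses speeds _hdom hpre
  obtain ⟨hne, hlen, _hnz⟩ := hpre
  unfold Spec_solution solution solution_alt
  simp only []
  -- name the shared days list
  set days := (progresses.zip speeds).map (fun ps => -(PySem.Int.floordiv (ps.1 - 100) ps.2)) with hdays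
  have hcd : (PySem.List.pyRange 0 (progresses.length : Int) 1).foldl
      (fun cd i => cd ++ [pyCeil100 (PySem.List.pyGetD progresses i 0) (PySem.List.pyGetD speeds i 0)]) []
      = days := by
    rw [foldl_append_map, days_eq progresses speeds hlen]; simp [hdays]
  rw [hcd]
  have hdl : days.length = progresses.length := by
    simp [hdays, List.length_zip, Nat.min_eq_left hlen]
  -- days is nonempty
  obtain ⟨d0, t, ht⟩ : ∃ d0 t, days = d0 :: t := by
    cases hd : days with
    | nil => exfalso; apply hne; have := hdl; rw [hd] at this; simpa using this.symm
    | cons a b => exact ⟨a, b, rfl⟩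
  -- A side: convert the pyRange/pyGetD loop into a foldl over days
  have hn : (progresses.length : Int) = (days.length : Int) := by rw [hdl]
  rw [hn]
  rw [PySem.List.foldl_pyRange_zero_pyGetD' days 0 stepA]
  have hfirst : PySem.List.pyGetD days 0 0 = d0 := by rw [ht]; exact PySem.List.pyGetD_zero_cons _ _ _
  rw [hfirst, ht]
  -- B side: starts = 0 :: startsRec t 1 d0
  have hB : (PySem.List.enumerate (d0 :: t) 0).foldl stepB ([], none)
      = (0 :: startsRec t 1 d0, some (fpeak t d0)) := by
    rw [PySem.List.enumerate_cons]
    simp only [List.foldl_cons, stepB]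
    rw [foldlB_eq_startsRec t (0 + 1) ([] ++ [(0 : Int)]) d0]
    simp
  rw [hB]
  simp only []
  rw [zipmap_eq_diffs]
  -- A's fold = aloop
  have hA := foldlA_eq_aloop (d0 :: t) [] 0 d0
  simp only [List.nil_append] at hA
  rw [hA]
  have ha0 : aloop (d0 :: t) 0 d0 = aloop t 1 d0 := by
    simp [aloop]
  rw [ha0]
  have hd := diffs_startsRec t 1 d0 0
  rw [show (1 : Int) - 0 = 1 by ring] at hd
  have hlen2 : ((d0 :: t).length : Int) = 1 + (t.length : Int) := by simp; ring
  rw [hlen2, hd]
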